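-- pv_equiv track=rewrite | github.com/dylan-murray/sigil | sigil/knowledge.py | _extract_h1s
-- ===== SOURCE A (Python) =====
-- def _extract_h1s(content: str) -> list[str]:
--     h1s = []
--     in_fence = False
--     for ln in content.strip().splitlines():
--         if ln.startswith("```"):
--             in_fence = not in_fence
--             continue
--         if in_fence:
--             continue
--         if ln.startswith("# ") and not ln.startswith("## "):
--             h1s.append(ln.lstrip("#").strip())
--     return h1s
-- ===== SOURCE B (Python) =====
-- def _extract_h1s(content: str) -> list[str]:
--     segments = []
--     cur = []
--     for ln in content.strip().splitlines():
--         if ln.startswith("```"):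
--             segments.append(cur)
--             cur = []
--         else:
--             cur.append(ln)
--     segments.append(cur)
--     return [ln.lstrip("#").strip()
--             for seg in segments[::2]
--             for ln in seg
--             if ln.startswith("# ") and not ln.startswith("## ")]
-- ===== Notes on version B (the rewrite author's own statement) =====
-- stated objective: alternative
-- what changed: A walks the lines once with a boolean in_fence toggle; B instead splits the lines into segments at the fence markers and then collects H1s only from the alternating outside segments (segments[::2]).
import Mathlib
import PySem

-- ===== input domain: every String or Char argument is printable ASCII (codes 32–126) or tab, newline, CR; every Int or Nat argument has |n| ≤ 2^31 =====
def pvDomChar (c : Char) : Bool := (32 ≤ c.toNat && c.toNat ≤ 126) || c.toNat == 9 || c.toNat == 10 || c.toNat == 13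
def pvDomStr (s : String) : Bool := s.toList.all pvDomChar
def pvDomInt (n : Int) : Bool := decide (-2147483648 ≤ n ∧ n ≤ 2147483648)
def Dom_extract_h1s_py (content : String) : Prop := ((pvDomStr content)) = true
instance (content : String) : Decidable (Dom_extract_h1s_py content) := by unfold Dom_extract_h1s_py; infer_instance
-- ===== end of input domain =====

-- B replaces A's boolean fence toggle by a two-pass decomposition: split the lines into
-- segments at the fence markers, then collect H1s from the alternating outside segments
-- (segments[::2]); same return value, alternative structure (objective: alternative).

-- shared helpers: both Pythons contain the literal expressions
-- 'ln.startswith("# ") and not ln.startswith("## ")' and 'ln.lstrip("#").strip()'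
def pvH1Test (ln : String) : Bool :=
  PySem.Str.startswith ln "# " && !(PySem.Str.startswith ln "## ")

-- ln.lstrip("#") ported by hand (PySem has no lstrip-with-chars): dropping the leading
-- run of '#' characters is exactly Python's str.lstrip("#"); then Python's .strip()
def pvH1Clean (ln : String) : String :=
  PySem.Str.strip (String.ofList (ln.toList.dropWhile (· == '#')))

-- ===== PORT A =====
def extract_h1s_py (content : String) : List String :=
  ((PySem.Str.splitlines (PySem.Str.strip content)).foldl
    (fun (st : List String × Bool) ln =>
      if PySem.Str.startswith ln "```" then (st.1, !st.2)
      else if st.2 then st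
      else if pvH1Test ln then (st.1 ++ [pvH1Clean ln], st.2)
      else st)
    ([], false)).1

-- ===== PORT B =====
def extract_h1s_py_alt (content : String) : List String :=
  let st := (PySem.Str.splitlines (PySem.Str.strip content)).foldl
    (fun (st : List (List String) × List String) ln =>
      if PySem.Str.startswith ln "```" then (st.1 ++ [st.2], [])
      else (st.1, st.2 ++ [ln]))
    ([], [])
  let segments := st.1 ++ [st.2]
  match PySem.List.slice? segments none none 2 with  -- segments[::2]
  | some evens => evens.flatMap (fun seg => (seg.filter pvH1Test).map pvH1Clean)
  | none => []  -- unreachable (step = 2 ≠ 0); totalisation only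

-- ===== PRECONDITION & SPEC =====
def Spec_extract_h1s_py (content : String) (out : List String) : Prop := out = extract_h1s_py_alt content
instance (content : String) (out : List String) : Decidable (Spec_extract_h1s_py content out) := by unfold Spec_extract_h1s_py; infer_instance

-- ===== CLAIM (what is proved, stated in full; the proofs are below) =====
def Claim_equal_extract_h1s_py : Prop := ∀ (content : String), Dom_extract_h1s_py content → Spec_extract_h1s_py content (extract_h1s_py content)

-- ===== LEMMAS AND PROOFS =====

-- A's loop as structural recursion (flag-carrying)
def pvG : List String → Bool → List String
  | [], _ => []
  | l :: ls, f =>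
    if PySem.Str.startswith l "```" then pvG ls (!f)
    else if f then pvG ls f
    else if pvH1Test l then pvH1Clean l :: pvG ls f
    else pvG ls f

-- the segment decomposition B's first pass computes
def pvSegs : List String → List (List String)
  | [] => [[]]
  | l :: ls =>
    if PySem.Str.startswith l "```" then [] :: pvSegs ls
    else
      match pvSegs ls with
      | [] => [[l]]            -- unreachable: pvSegs is never []
      | h :: t => (l :: h) :: t

def pvEvens {α : Type} : List α → List α
  | [] => []
  | [x] => [x]
  | x :: _ :: xs => x :: pvEvens xs

def pvOdds {α : Type} (xs : List α) : List α := pvEvens xs.tail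

def pvCollect (segs : List (List String)) : List String :=
  segs.flatMap (fun seg => (seg.filter pvH1Test).map pvH1Clean)

theorem pvEvens_cons {α : Type} (a : α) (s : List α) :
    pvEvens (a :: s) = a :: pvOdds s := by
  cases s <;> simp [pvEvens, pvOdds]

theorem pvSegs_ne_nil (ls : List String) : pvSegs ls ≠ [] := by
  cases ls with
  | nil => simp [pvSegs]
  | cons l ls =>
    simp only [pvSegs]
    split
    · simp
    · split <;> simp

-- A's fold accumulates pvG
theorem pvA_fold (ls : List String) (acc : List String) (f : Bool) :
    (ls.foldl
      (fun (st : List String × Bool) ln =>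
        if PySem.Str.startswith ln "```" then (st.1, !st.2)
        else if st.2 then st
        else if pvH1Test ln then (st.1 ++ [pvH1Clean ln], st.2)
        else st)
      (acc, f)).1 = acc ++ pvG ls f := by
  induction ls generalizing acc f with
  | nil => simp [pvG]
  | cons l ls ih =>
    simp only [List.foldl_cons, pvG]
    by_cases hf : PySem.Str.startswith l "```" = true
    · simp only [hf, if_true]; exact ih _ _
    · simp only [hf, Bool.false_eq_true, if_false]
      by_cases hin : f
      · simp only [hin, if_true]; exact ih _ _
      · simp only [hin, Bool.false_eq_true, if_false]
        by_cases ht : pvH1Test l = true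
        · simp only [ht, if_true, ih]; simp
        · simp only [ht, Bool.false_eq_true, if_false]; exact ih _ _

-- B's first pass computes pvSegs (with accumulated prefix ss and open segment cur)
theorem pvB_fold (ls : List String) (ss : List (List String)) (cur : List String) :
    (ls.foldl
      (fun (st : List (List String) × List String) ln =>
        if PySem.Str.startswith ln "```" then (st.1 ++ [st.2], [])
        else (st.1, st.2 ++ [ln]))
      (ss, cur)).1 ++
    [(ls.foldl
      (fun (st : List (List String) × List String) ln =>
        if PySem.Str.startswith ln "```" then (st.1 ++ [st.2], [])
        else (st.1, st.2 ++ [ln]))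
      (ss, cur)).2] =
    ss ++ (match pvSegs ls with
           | [] => [cur]
           | h :: t => (cur ++ h) :: t) := by
  induction ls generalizing ss cur with
  | nil => simp [pvSegs]
  | cons l ls ih =>
    simp only [List.foldl_cons, pvSegs]
    by_cases hf : PySem.Str.startswith l "```" = true
    · simp only [hf, if_true, ih]
      have h := pvSegs_ne_nil ls
      cases hS : pvSegs ls with
      | nil => exact absurd hS h
      | cons h t => simp
    · simp only [hf, if_false, Bool.false_eq_true, ih]
      have h := pvSegs_ne_nil ls
      cases hS : pvSegs ls with
      | nil => exact absurd hS h
      | cons h t => simp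

-- collecting over the even (outside) segments is A's toggle with flag false;
-- over the odd (inside) ones, with flag true
theorem pvParity (ls : List String) :
    pvCollect (pvEvens (pvSegs ls)) = pvG ls false ∧
    pvCollect (pvOdds (pvSegs ls)) = pvG ls true := by
  induction ls with
  | nil => simp [pvSegs, pvEvens, pvOdds, pvCollect, pvG]
  | cons l ls ih =>
    simp only [pvSegs, pvG]
    by_cases hf : PySem.Str.startswith l "```" = true
    · simp only [hf, if_true, pvEvens_cons, pvOdds, List.tail_cons]
      constructor
      · simpa [pvCollect] using ih.2
      · simpa using ih.1
    · simp only [hf, Bool.false_eq_true, if_false]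
      have h := pvSegs_ne_nil ls
      cases hS : pvSegs ls with
      | nil => exact absurd hS h
      | cons hd t =>
        rw [hS] at ih
        have h1 : pvCollect (pvEvens ((l :: hd) :: t))
            = (if pvH1Test l then [pvH1Clean l] else []) ++ pvCollect (pvEvens (hd :: t)) := by
          rw [pvEvens_cons, pvEvens_cons]
          by_cases ht : pvH1Test l = true <;> simp [pvCollect, ht]
        have h2 : pvOdds ((l :: hd) :: t) = pvOdds (hd :: t) := by
          simp [pvOdds]
        constructor
        · rw [h1, ih.1]
          by_cases ht : pvH1Test l = true <;> simp [ht]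
        · rw [h2, ih.2]; simp

-- segments[::2] is pvEvens
theorem pvSlice2 {α : Type} (xs : List α) :
    PySem.List.slice? xs none none 2 = some (pvEvens xs) := by
  simp only [PySem.List.slice?, PySem.List.sliceIndices]
  norm_num
  induction xs using pvEvens.induct with
  | case1 => simp [pvEvens]
  | case2 x => simp [pvEvens, List.range_succ]
  | case3 x y xs ih =>
    simp only [pvEvens, List.length_cons]
    have hcnt : (if 0 < xs.length + 1 + 1 then ((((xs.length + 1 + 1 : Nat) : Int)) + 2 - 1) / 2 |>.toNat else 0)
        = ((if 0 < xs.length then ((((xs.length : Nat) : Int)) + 2 - 1) / 2 |>.toNat else 0)) + 1 := by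
      split_ifs <;> omega
    rw [hcnt, List.range_succ_eq_map, List.filterMap_cons, List.filterMap_map]
    simp only [Nat.cast_zero, Int.mul_zero, Int.toNat_zero, List.getElem?_cons_zero]
    have hfun : ((fun k : Nat => (x :: y :: xs)[(2 * (k : Int)).toNat]?) ∘ (fun n : Nat => n + 1))
        = (fun k : Nat => xs[(2 * (k : Int)).toNat]?) := by
      funext k
      simp only [Function.comp]
      rw [show ((2 : Int) * (((k + 1 : Nat) : Int))).toNat = (2 * (k : Int)).toNat + 2 from by
        push_cast; omega]
      simp
    rw [hfun, ih]

-- ===== VERDICT (by name: the statement is the Claim_ definition above) =====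
theorem extract_h1s_py_spec : Claim_equal_extract_h1s_py := by
  intro content _
  unfold Spec_extract_h1s_py extract_h1s_py extract_h1s_py_alt
  dsimp only
  rw [pvA_fold, pvB_fold]
  have h := pvSegs_ne_nil (PySem.Str.splitlines (PySem.Str.strip content))
  cases hS : pvSegs (PySem.Str.splitlines (PySem.Str.strip content)) with
  | nil => exact absurd hS h
  | cons hd t =>
    simp only [List.nil_append, pvSlice2]
    have := (pvParity (PySem.Str.splitlines (PySem.Str.strip content))).1
    rw [hS] at this
    rw [← this]
    rfl
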